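-- pv_equiv track=rewrite | github.com/juhapekka/tira25 | samesplit.py | count_splits
-- ===== SOURCE A (Python) =====
-- def count_splits(numbers):
--     setti = set(numbers)
--     unik = dict.fromkeys(setti, 0)
--     namo = len(unik.keys())
--
--     for i in numbers:
--         unik[i] += 1
--
--     passed = dict.fromkeys(setti, 0)
--     count = 0
--     lunik = 0
--
--     for i in numbers:
--         if passed[i] == 0:
--             passed[i] += 1
--             lunik += 1
--
--         unik[i] -= 1
--         if unik[i] == 0:
--             return count
--
--         if lunik == namo:
--             count += 1
--
--     return count
-- ===== SOURCE B (Python) =====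
-- def count_splits(numbers):
--     first = {}
--     last = {}
--     for i, v in enumerate(numbers):
--         if v not in first:
--             first[v] = i
--         last[v] = i
--     if not numbers:
--         return 0
--     s = max(first.values())   # index where the last distinct value first appears
--     e = min(last.values())    # earliest index that is some value's final occurrence
--     return max(0, e - s)
-- ===== Notes on version B (the rewrite author's own statement) =====
-- stated objective: simpler
-- what changed: A simulates the split scan with a decrementing count dict, a seen dict and an early return; B builds first- and last-occurrence index tables in one enumerate pass and returns the closed form max(0, min(last.values()) - max(first.values())).
import Mathlib
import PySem

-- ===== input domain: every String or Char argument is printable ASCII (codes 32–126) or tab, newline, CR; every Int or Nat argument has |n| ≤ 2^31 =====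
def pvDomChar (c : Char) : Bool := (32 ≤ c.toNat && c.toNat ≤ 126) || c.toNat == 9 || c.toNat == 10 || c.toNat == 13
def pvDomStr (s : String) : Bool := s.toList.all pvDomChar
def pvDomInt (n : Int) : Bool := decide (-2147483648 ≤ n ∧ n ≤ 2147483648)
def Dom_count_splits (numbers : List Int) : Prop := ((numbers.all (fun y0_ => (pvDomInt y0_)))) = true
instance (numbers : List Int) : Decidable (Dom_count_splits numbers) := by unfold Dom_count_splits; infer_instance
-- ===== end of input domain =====

-- B replaces A's decrementing-count simulation with first/last occurrence index tables and
-- the closed form max(0, min(last indices) - max(first indices)); objective: simpler.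


-- ===== PORT A =====
-- the second 'for i in numbers' loop of A (early 'return count' = the first branch)
def count_splits_loop (namo : Int) (unik passed : PySem.Dict Int Int) (count lunik : Int) :
    List Int → Int
  | [] => count
  | i :: rest =>
    let pl : PySem.Dict Int Int × Int :=
      if passed.getD i 0 = 0 then (passed.modify i 0 (· + 1), lunik + 1) else (passed, lunik)
    let unik' := unik.modify i 0 (· - 1)
    if unik'.getD i 0 = 0 then count
    else if pl.2 = namo then count_splits_loop namo unik' pl.1 (count + 1) pl.2 rest
    else count_splits_loop namo unik' pl.1 count pl.2 rest

def count_splits (numbers : List Int) : Int :=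
  let setti : PySem.Set Int := PySem.Set.ofList numbers
  let unik0 : PySem.Dict Int Int := setti.foldl (fun d k => d.insert k 0) PySem.Dict.empty
  let namo : Int := ((PySem.Dict.keys unik0).length : Int)
  let unik := numbers.foldl (fun d i => d.modify i 0 (· + 1)) unik0
  let passed : PySem.Dict Int Int := setti.foldl (fun d k => d.insert k 0) PySem.Dict.empty
  count_splits_loop namo unik passed 0 0 numbers

-- ===== PORT B =====
def count_splits_alt (numbers : List Int) : Int :=
  let fl := (PySem.List.enumerate numbers 0).foldl
    (fun (fl : PySem.Dict Int Int × PySem.Dict Int Int) (p : Int × Int) =>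
      ((if fl.1.contains p.2 then fl.1 else fl.1.insert p.2 p.1), fl.2.insert p.2 p.1))
    (PySem.Dict.empty, PySem.Dict.empty)
  if numbers = [] then 0
  else
    match PySem.List.max? fl.1.values (fun x => x), PySem.List.min? fl.2.values (fun x => x) with
    | some s, some e => max 0 (e - s)
    | _, _ => 0

-- ===== PRECONDITION & SPEC =====
def Spec_count_splits (numbers : List Int) (out : Int) : Prop := out = count_splits_alt numbers
instance (numbers : List Int) (out : Int) : Decidable (Spec_count_splits numbers out) := by unfold Spec_count_splits; infer_instance

-- ===== CLAIM (what is proved, stated in full; the proofs are below) =====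
def Claim_equal_count_splits : Prop := ∀ (numbers : List Int), Dom_count_splits numbers → Spec_count_splits numbers (count_splits numbers)

-- ===== LEMMAS AND PROOFS =====

-- index of the first occurrence of v in the list (0 past the end)
def pvFIdx (v : Int) : List Int → Int
  | [] => 0
  | x :: xs => if v = x then 0 else 1 + pvFIdx v xs

-- index of the last occurrence of v in the list (0 past the end)
def pvLIdx (v : Int) : List Int → Int
  | [] => 0
  | _ :: xs => if v ∈ xs then 1 + pvLIdx v xs else 0

-- index of the first position that is the last occurrence of its value
def pvE : List Int → Int
  | [] => 0
  | x :: xs => if x ∈ xs then 1 + pvE xs else 0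

-- index of the first position after which `seen` plus the prefix covers all tot values
def pvS (tot : Nat) (seen : Finset Int) : List Int → Int
  | [] => 0
  | x :: xs => if (insert x seen).card = tot then 0 else 1 + pvS tot (insert x seen) xs

theorem pvLIdx_nonneg (v : Int) (l : List Int) : 0 ≤ pvLIdx v l := by
  induction l with
  | nil => simp [pvLIdx]
  | cons x xs ih => simp only [pvLIdx]; split <;> omega

theorem pvE_nonneg (l : List Int) : 0 ≤ pvE l := by
  induction l with
  | nil => simp [pvE]
  | cons x xs ih => simp only [pvE]; split <;> omega

theorem pvS_nonneg (tot : Nat) (seen : Finset Int) (l : List Int) : 0 ≤ pvS tot seen l := by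
  induction l generalizing seen with
  | nil => simp [pvS]
  | cons x xs ih =>
    simp only [pvS]; split
    · omega
    · have := ih (insert x seen); omega

-- every last-occurrence index is at least pvE
theorem pvE_le_pvLIdx (l : List Int) (v : Int) (hv : v ∈ l) : pvE l ≤ pvLIdx v l := by
  induction l with
  | nil => simp at hv
  | cons x xs ih =>
    simp only [pvE, pvLIdx]
    by_cases hx : x ∈ xs
    · simp only [hx, if_true]
      rcases List.mem_cons.mp hv with rfl | hvxs
      · simp only [hx, if_true]; have := ih hx; omega
      · have h1 := ih hvxs; simp only [hvxs, if_true]; omega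
    · simp only [hx, if_false]
      split
      · have := pvLIdx_nonneg v xs; omega
      · omega

-- pvE is attained by some value
theorem pvE_attained (l : List Int) (hl : l ≠ []) : ∃ v ∈ l, pvLIdx v l = pvE l := by
  induction l with
  | nil => exact absurd rfl hl
  | cons x xs ih =>
    by_cases hx : x ∈ xs
    · have hxs : xs ≠ [] := by rintro rfl; simp at hx
      obtain ⟨v, hvmem, hveq⟩ := ih hxs
      exact ⟨v, List.mem_cons_of_mem _ hvmem, by simp only [pvLIdx, pvE, hvmem, hx, if_true]; omega⟩
    · exact ⟨x, List.mem_cons_self, by simp only [pvLIdx, pvE, hx, if_false]⟩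

-- every first-occurrence index of an unseen value is at most pvS
theorem pvFIdx_le_pvS (T : Finset Int) (l : List Int) (seen : Finset Int)
    (hsub : seen ⊆ T) (hmem : ∀ v ∈ l, v ∈ T) (v : Int) (hv : v ∈ l) (hvs : v ∉ seen) :
    pvFIdx v l ≤ pvS T.card seen l := by
  induction l generalizing seen with
  | nil => simp at hv
  | cons x xs ih =>
    have hxT : x ∈ T := hmem x List.mem_cons_self
    simp only [pvFIdx, pvS]
    by_cases hvx : v = x
    · subst hvx
      simp only [if_true]
      split
      · omega
      · have := pvS_nonneg T.card (insert v seen) xs; omega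
    · simp only [hvx, if_false]
      split
      · rename_i hcard
        exfalso
        have hTeq : insert x seen = T :=
          Finset.eq_of_subset_of_card_le (Finset.insert_subset hxT hsub) (le_of_eq hcard.symm)
        have : v ∈ insert x seen := hTeq ▸ hmem v hv
        rcases Finset.mem_insert.mp this with h | h
        · exact hvx h
        · exact hvs h
      · have hvxs : v ∈ xs := by
          rcases List.mem_cons.mp hv with h | h
          · exact absurd h hvx
          · exact h
        have := ih (insert x seen) (Finset.insert_subset hxT hsub)
          (fun w hw => hmem w (List.mem_cons_of_mem _ hw)) hvxs
          (fun h => hvs (Finset.mem_of_mem_insert_of_ne h hvx))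
        omega

-- pvS is attained by some unseen value
theorem pvS_attained (T : Finset Int) (l : List Int) (seen : Finset Int)
    (hsub : seen ⊆ T) (hmem : ∀ v ∈ l, v ∈ T) (hcov : seen ∪ l.toFinset = T)
    (hne : seen ≠ T) : ∃ v ∈ l, v ∉ seen ∧ pvFIdx v l = pvS T.card seen l := by
  induction l generalizing seen with
  | nil =>
    exfalso; apply hne
    simpa using hcov
  | cons x xs ih =>
    have hxT : x ∈ T := hmem x List.mem_cons_self
    have hsub' : insert x seen ⊆ T := Finset.insert_subset hxT hsub
    have hcov' : insert x seen ∪ xs.toFinset = T := by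
      rw [← hcov, List.toFinset_cons]
      rw [Finset.insert_union, Finset.union_insert]
    by_cases hcard : (insert x seen).card = T.card
    · have hTeq : insert x seen = T :=
        Finset.eq_of_subset_of_card_le hsub' (le_of_eq hcard.symm)
      have hxs : x ∉ seen := by
        intro h
        exact hne (by rwa [Finset.insert_eq_self.mpr h] at hTeq)
      exact ⟨x, List.mem_cons_self, hxs, by simp [pvFIdx, pvS, hcard]⟩
    · have hne' : insert x seen ≠ T := fun h => hcard (by rw [h])
      obtain ⟨v, hvxs, hvs', hveq⟩ := ih (insert x seen) hsub'
        (fun w hw => hmem w (List.mem_cons_of_mem _ hw)) hcov' hne'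
      have hvx : v ≠ x := fun h => hvs' (h ▸ Finset.mem_insert_self x seen)
      refine ⟨v, List.mem_cons_of_mem _ hvxs,
        fun h => hvs' (Finset.mem_insert_of_mem h), ?_⟩
      simp only [pvFIdx, pvS, hvx, if_false, hcard]
      omega

-- ===== A-side lemmas =====

theorem zero_dict_getD (l : List Int) (d : PySem.Dict Int Int)
    (h : ∀ v, d.getD v 0 = 0) (v : Int) :
    (l.foldl (fun d k => d.insert k 0) d).getD v 0 = 0 := by
  induction l generalizing d with
  | nil => simpa using h v
  | cons x xs ih =>
    simp only [List.foldl_cons]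
    refine ih _ (fun w => ?_)
    rw [PySem.Dict.getD_insert]
    split <;> [rfl; exact h w]

theorem loopA_step (T : Finset Int) (i : Int) (rest : List Int)
    (ih : ∀ (seen : Finset Int) (unik passed : PySem.Dict Int Int) (count : Int),
      (∀ v, unik.getD v 0 = (rest.count v : Int)) →
      (∀ v, passed.getD v 0 = if v ∈ seen then 1 else 0) →
      seen ⊆ T → (∀ v ∈ rest, v ∈ T) → seen ∪ rest.toFinset = T →
      count_splits_loop (T.card : Int) unik passed count (seen.card : Int) rest
        = count + max 0 (pvE rest - pvS T.card seen rest))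
    (seen seen' : Finset Int) (unik' passed' : PySem.Dict Int Int) (count : Int)
    (hseenrel : seen' = insert i seen)
    (hunik' : ∀ v, unik'.getD v 0 = (rest.count v : Int))
    (hpassed' : ∀ v, passed'.getD v 0 = if v ∈ seen' then 1 else 0)
    (hiT : i ∈ T) (hsub : seen ⊆ T) (hmem' : ∀ v ∈ rest, v ∈ T)
    (hcov' : seen' ∪ rest.toFinset = T) :
    (if unik'.getD i 0 = 0 then count
     else if (seen'.card : Int) = (T.card : Int) then
       count_splits_loop (T.card : Int) unik' passed' (count + 1) (seen'.card : Int) rest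
     else count_splits_loop (T.card : Int) unik' passed' count (seen'.card : Int) rest)
    = count + max 0 (pvE (i :: rest) - pvS T.card seen (i :: rest)) := by
  rw [hunik' i]
  by_cases hir : i ∈ rest
  · have hc0 : ((rest.count i : Nat) : Int) ≠ 0 := by
      have := List.count_pos_iff.mpr hir
      omega
    rw [if_neg hc0]
    have hsub'' : seen' ⊆ T := hseenrel ▸ Finset.insert_subset hiT hsub
    by_cases hcard : seen'.card = T.card
    · rw [if_pos (by exact_mod_cast hcard)]
      rw [ih seen' unik' passed' (count + 1) hunik' hpassed' hsub'' hmem' hcov']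
      have hTeq : seen' = T := Finset.eq_of_subset_of_card_le hsub'' (le_of_eq hcard.symm)
      obtain ⟨y, ys, rfl⟩ := List.exists_cons_of_ne_nil (List.ne_nil_of_mem hir)
      have hyT : y ∈ T := hmem' y List.mem_cons_self
      have hS0 : pvS T.card seen' (y :: ys) = 0 := by
        simp [pvS, hTeq, Finset.insert_eq_self.mpr hyT]
      have hScons : pvS T.card seen (i :: y :: ys) = 0 := by
        simp [pvS, ← hseenrel, hcard]
      have hE : pvE (i :: y :: ys) = 1 + pvE (y :: ys) := by simp [pvE, hir]
      rw [hS0, hScons, hE]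
      have h1 := pvE_nonneg (y :: ys)
      rw [max_eq_right (by omega), max_eq_right (by omega)]
      ring
    · rw [if_neg (by exact_mod_cast hcard)]
      rw [ih seen' unik' passed' count hunik' hpassed' hsub'' hmem' hcov']
      have hE : pvE (i :: rest) = 1 + pvE rest := by simp [pvE, hir]
      have hS : pvS T.card seen (i :: rest) = 1 + pvS T.card seen' rest := by
        simp [pvS, ← hseenrel, hcard]
      rw [hE, hS]
      have harith : 1 + pvE rest - (1 + pvS T.card seen' rest)
          = pvE rest - pvS T.card seen' rest := by ring
      rw [harith]
  · have hc0 : ((rest.count i : Nat) : Int) = 0 := by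
      simp [List.count_eq_zero.mpr hir]
    rw [if_pos hc0]
    have hE : pvE (i :: rest) = 0 := by simp [pvE, hir]
    rw [hE]
    have := pvS_nonneg T.card seen (i :: rest)
    rw [max_eq_left (by omega)]
    ring

theorem loopA (T : Finset Int) (rest : List Int) :
    ∀ (seen : Finset Int) (unik passed : PySem.Dict Int Int) (count : Int),
    (∀ v, unik.getD v 0 = (rest.count v : Int)) →
    (∀ v, passed.getD v 0 = if v ∈ seen then 1 else 0) →
    seen ⊆ T → (∀ v ∈ rest, v ∈ T) → seen ∪ rest.toFinset = T →
    count_splits_loop (T.card : Int) unik passed count (seen.card : Int) rest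
      = count + max 0 (pvE rest - pvS T.card seen rest) := by
  induction rest with
  | nil =>
    intro seen unik passed count _ _ _ _ _
    simp [count_splits_loop, pvE, pvS]
  | cons i rest ih =>
    intro seen unik passed count hunik hpassed hsub hmem hcov
    have hiT : i ∈ T := hmem i List.mem_cons_self
    have hsub' : insert i seen ⊆ T := Finset.insert_subset hiT hsub
    have hmem' : ∀ v ∈ rest, v ∈ T := fun w hw => hmem w (List.mem_cons_of_mem _ hw)
    have hcov' : insert i seen ∪ rest.toFinset = T := by
      rw [← hcov, List.toFinset_cons, Finset.insert_union, Finset.union_insert]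
    have hunik' : ∀ v, (unik.modify i 0 (· - 1)).getD v 0 = (rest.count v : Int) := by
      intro v
      rw [PySem.Dict.getD_modify]
      by_cases hv : v = i
      · subst hv
        rw [if_pos rfl, hunik v]
        push_cast [List.count_cons_self]
        ring
      · rw [if_neg hv, hunik v]
        congr 1
        simp [List.count_cons, Ne.symm hv]
    by_cases his : i ∈ seen
    · have hP1 : passed.getD i 0 = 1 := by rw [hpassed]; simp [his]
      have hseen : insert i seen = seen := Finset.insert_eq_self.mpr his
      simp only [count_splits_loop, hP1]
      rw [if_neg one_ne_zero]
      exact loopA_step T i rest ih seen seen _ passed count hseen.symm hunik'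
        hpassed hiT hsub hmem' (by rwa [hseen] at hcov')
    · have hP0 : passed.getD i 0 = 0 := by rw [hpassed]; simp [his]
      have hpassed' : ∀ v, (passed.modify i 0 (· + 1)).getD v 0
          = if v ∈ insert i seen then 1 else 0 := by
        intro v
        rw [PySem.Dict.getD_modify]
        by_cases hv : v = i
        · subst hv; simp [hP0]
        · rw [if_neg hv, hpassed v]
          simp [Finset.mem_insert, hv]
      have hcard1 : ((seen.card : Int) + 1) = ((insert i seen).card : Int) := by
        rw [Finset.card_insert_of_notMem his]; push_cast; ring
      simp only [count_splits_loop, hP0]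
      simp only [if_true]
      show (if (unik.modify i 0 (· - 1)).getD i 0 = 0 then count
        else if ((seen.card : Int) + 1) = (T.card : Int) then
          count_splits_loop (T.card : Int) (unik.modify i 0 (· - 1))
            (passed.modify i 0 (· + 1)) (count + 1) ((seen.card : Int) + 1) rest
        else count_splits_loop (T.card : Int) (unik.modify i 0 (· - 1))
            (passed.modify i 0 (· + 1)) count ((seen.card : Int) + 1) rest) = _
      rw [hcard1]
      exact loopA_step T i rest ih seen (insert i seen) _ _ count rfl hunik'
        hpassed' hiT hsub hmem' hcov'

theorem setti_length (numbers : List Int) :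
    (PySem.Set.ofList numbers).length = numbers.toFinset.card := by
  rw [← List.toFinset_card_of_nodup (PySem.Set.nodup_ofList numbers)]
  congr 1
  ext v
  simp [List.mem_toFinset, PySem.Set.mem_ofList]

theorem count_splits_closed (numbers : List Int) :
    count_splits numbers
      = max 0 (pvE numbers - pvS numbers.toFinset.card ∅ numbers) := by
  have hzero : ∀ v, ((PySem.Set.ofList numbers).foldl (fun d k => d.insert k 0)
      (PySem.Dict.empty : PySem.Dict Int Int)).getD v 0 = 0 :=
    zero_dict_getD _ _ (fun v => by simp [pysem])
  have hkeysl : ((PySem.Set.ofList numbers).foldl (fun d k => d.insert k (0:Int))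
      (PySem.Dict.empty : PySem.Dict Int Int)).keys = PySem.Set.ofList numbers := by
    rw [PySem.Dict.keys_foldl_insert (f := fun _ _ => (0 : Int))]
    rw [PySem.Dict.keys_empty]
    rw [PySem.Set.update_eq_append_of_disjoint [] _ (PySem.Set.nodup_ofList numbers) (by simp)]
    simp
  simp only [count_splits]
  rw [hkeysl, setti_length]
  have hloop := loopA numbers.toFinset numbers ∅
    (List.foldl (fun d i => d.modify i 0 (· + 1))
      (List.foldl (fun d k => d.insert k (0:Int)) PySem.Dict.empty (PySem.Set.ofList numbers))
      numbers)
    (List.foldl (fun d k => d.insert k (0:Int)) PySem.Dict.empty (PySem.Set.ofList numbers)) 0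
    (fun v => by rw [PySem.Dict.getD_foldl_modify_add_one, hzero v, zero_add])
    (fun v => by rw [hzero v]; simp)
    (by simp) (fun v hv => List.mem_toFinset.mpr hv) (by simp)
  simp only [Finset.card_empty, Nat.cast_zero, zero_add] at hloop
  exact hloop

-- ===== B-side lemmas =====

-- B's fold over enumerate splits into two independent dict folds
theorem bfold_split (ps : List (Int × Int)) (f la : PySem.Dict Int Int) :
    ps.foldl (fun (fl : PySem.Dict Int Int × PySem.Dict Int Int) (p : Int × Int) =>
      ((if fl.1.contains p.2 then fl.1 else fl.1.insert p.2 p.1), fl.2.insert p.2 p.1)) (f, la)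
    = (ps.foldl (fun d p => if d.contains p.2 then d else d.insert p.2 p.1) f,
       ps.foldl (fun (d : PySem.Dict Int Int) (p : Int × Int) => d.insert p.2 p.1) la) := by
  induction ps generalizing f la with
  | nil => rfl
  | cons p ps ih =>
    simp only [List.foldl_cons]
    rw [ih]

-- the first-occurrence dict's lookups
theorem ffold_get? (l : List Int) : ∀ (s : Int) (f : PySem.Dict Int Int) (v : Int),
    ((PySem.List.enumerate l s).foldl
        (fun d p => if d.contains p.2 then d else d.insert p.2 p.1) f).get? v
    = if f.contains v then f.get? v
      else if v ∈ l then some (s + pvFIdx v l) else none := by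
  induction l with
  | nil =>
    intro s f v
    by_cases hc : f.contains v
    · simp [PySem.List.enumerate_nil, hc]
    · simp only [Bool.not_eq_true] at hc
      simp [PySem.List.enumerate_nil, hc,
        (PySem.Dict.get?_eq_none_iff_contains f v).mpr hc]
  | cons x xs ih =>
    intro s f v
    rw [PySem.List.enumerate_cons]
    simp only [List.foldl_cons]
    by_cases hfx : f.contains x
    · rw [if_pos hfx, ih (s + 1) f v]
      by_cases hfv : f.contains v
      · simp [hfv]
      · have hvx : v ≠ x := fun h => hfv (h ▸ hfx)
        simp only [hfv, if_false, List.mem_cons, hvx, false_or]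
        by_cases hvxs : v ∈ xs
        · simp only [hvxs, if_true, pvFIdx, hvx, if_false, Option.some.injEq]
          ring
        · simp [hvxs]
    · rw [if_neg hfx, ih (s + 1) (f.insert x s) v]
      by_cases hvx : v = x
      · subst hvx
        rw [PySem.Dict.contains_insert]
        simp only [BEq.rfl, Bool.true_or, if_true, PySem.Dict.get?_insert_self]
        simp only [Bool.not_eq_true] at hfx
        simp [hfx, pvFIdx]
      · rw [PySem.Dict.contains_insert]
        have hbeq : (v == x) = false := beq_eq_false_iff_ne.mpr hvx
        simp only [hbeq, Bool.false_or]
        by_cases hfv : f.contains v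
        · simp [hfv, PySem.Dict.get?_insert_of_ne f s hvx]
        · simp only [hfv, if_false, List.mem_cons, hvx, false_or]
          by_cases hvxs : v ∈ xs
          · simp only [hvxs, if_true, pvFIdx, hvx, if_false]
            simp only [Bool.false_eq_true, if_false, Option.some.injEq]
            omega
          · simp [hvxs]


-- the last-occurrence dict's lookups
theorem lfold_get? (l : List Int) : ∀ (s : Int) (la : PySem.Dict Int Int) (v : Int),
    ((PySem.List.enumerate l s).foldl
        (fun (d : PySem.Dict Int Int) (p : Int × Int) => d.insert p.2 p.1) la).get? v
    = if v ∈ l then some (s + pvLIdx v l) else la.get? v := by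
  induction l with
  | nil => intro s la v; simp [PySem.List.enumerate_nil]
  | cons x xs ih =>
    intro s la v
    rw [PySem.List.enumerate_cons]
    simp only [List.foldl_cons]
    rw [ih (s + 1) (la.insert x s) v]
    by_cases hvxs : v ∈ xs
    · simp only [hvxs, if_true, List.mem_cons, or_true, pvLIdx, Option.some.injEq]
      omega
    · by_cases hvx : v = x
      · subst hvx
        simp only [hvxs, if_false, List.mem_cons, true_or, if_true,
          PySem.Dict.get?_insert_self, pvLIdx, Option.some.injEq]
        omega
      · simp only [hvxs, if_false, List.mem_cons, hvx, false_or,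
          PySem.Dict.get?_insert_of_ne la s hvx]

theorem ffold_nodup (ps : List (Int × Int)) : ∀ f : PySem.Dict Int Int, f.keys.Nodup →
    (ps.foldl (fun d p => if d.contains p.2 then d else d.insert p.2 p.1) f).keys.Nodup := by
  induction ps with
  | nil => intro f hf; exact hf
  | cons p ps ih =>
    intro f hf
    simp only [List.foldl_cons]
    apply ih
    split
    · exact hf
    · exact PySem.Dict.nodup_keys_insert _ _ _ hf

theorem lfold_nodup (ps : List (Int × Int)) : ∀ la : PySem.Dict Int Int, la.keys.Nodup →
    (ps.foldl (fun (d : PySem.Dict Int Int) (p : Int × Int) => d.insert p.2 p.1) la).keys.Nodup := by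
  induction ps with
  | nil => intro la h; exact h
  | cons p ps ih =>
    intro la h
    simp only [List.foldl_cons]
    exact ih _ (PySem.Dict.nodup_keys_insert _ _ _ h)

theorem alt_values_first (numbers : List Int) (w : Int) :
    w ∈ ((PySem.List.enumerate numbers 0).foldl
        (fun d p => if d.contains p.2 then d else d.insert p.2 p.1)
        (PySem.Dict.empty : PySem.Dict Int Int)).values
    ↔ ∃ k ∈ numbers, w = pvFIdx k numbers := by
  have hget : ∀ v, ((PySem.List.enumerate numbers 0).foldl
      (fun d p => if d.contains p.2 then d else d.insert p.2 p.1)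
      (PySem.Dict.empty : PySem.Dict Int Int)).get? v
      = if v ∈ numbers then some (pvFIdx v numbers) else none := by
    intro v
    rw [ffold_get? numbers 0 PySem.Dict.empty v]
    simp [PySem.Dict.contains_empty, PySem.Dict.get?_empty]
  have hnodup := ffold_nodup (PySem.List.enumerate numbers 0) PySem.Dict.empty
    PySem.Dict.nodup_keys_empty
  rw [PySem.Dict.values_eq_map_keys _ hnodup 0, List.mem_map]
  constructor
  · rintro ⟨k, hk, rfl⟩
    have hkn : k ∈ numbers := by
      have hc := (PySem.Dict.contains_iff_mem_keys _ k).mpr hk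
      rw [PySem.Dict.contains_eq_isSome_get?, hget k] at hc
      by_contra hkn
      simp [hkn] at hc
    exact ⟨k, hkn, by rw [PySem.Dict.getD_eq_get?_getD, hget k]; simp [hkn]⟩
  · rintro ⟨k, hk, rfl⟩
    refine ⟨k, ?_, ?_⟩
    · rw [← PySem.Dict.contains_iff_mem_keys, PySem.Dict.contains_eq_isSome_get?, hget k]
      simp [hk]
    · rw [PySem.Dict.getD_eq_get?_getD, hget k]; simp [hk]

theorem alt_values_last (numbers : List Int) (w : Int) :
    w ∈ ((PySem.List.enumerate numbers 0).foldl
        (fun (d : PySem.Dict Int Int) (p : Int × Int) => d.insert p.2 p.1)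
        (PySem.Dict.empty : PySem.Dict Int Int)).values
    ↔ ∃ k ∈ numbers, w = pvLIdx k numbers := by
  have hget : ∀ v, ((PySem.List.enumerate numbers 0).foldl
      (fun (d : PySem.Dict Int Int) (p : Int × Int) => d.insert p.2 p.1)
      (PySem.Dict.empty : PySem.Dict Int Int)).get? v
      = if v ∈ numbers then some (pvLIdx v numbers) else none := by
    intro v
    rw [lfold_get? numbers 0 PySem.Dict.empty v]
    simp [PySem.Dict.get?_empty]
  have hnodup := lfold_nodup (PySem.List.enumerate numbers 0) PySem.Dict.empty
    PySem.Dict.nodup_keys_empty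
  rw [PySem.Dict.values_eq_map_keys _ hnodup 0, List.mem_map]
  constructor
  · rintro ⟨k, hk, rfl⟩
    have hkn : k ∈ numbers := by
      have hc := (PySem.Dict.contains_iff_mem_keys _ k).mpr hk
      rw [PySem.Dict.contains_eq_isSome_get?, hget k] at hc
      by_contra hkn
      simp [hkn] at hc
    exact ⟨k, hkn, by rw [PySem.Dict.getD_eq_get?_getD, hget k]; simp [hkn]⟩
  · rintro ⟨k, hk, rfl⟩
    refine ⟨k, ?_, ?_⟩
    · rw [← PySem.Dict.contains_iff_mem_keys, PySem.Dict.contains_eq_isSome_get?, hget k]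
      simp [hk]
    · rw [PySem.Dict.getD_eq_get?_getD, hget k]; simp [hk]

theorem alt_max (numbers : List Int) (hne : numbers ≠ []) :
    PySem.List.max? (((PySem.List.enumerate numbers 0).foldl
        (fun d p => if d.contains p.2 then d else d.insert p.2 p.1)
        (PySem.Dict.empty : PySem.Dict Int Int)).values) (fun x => x)
    = some (pvS numbers.toFinset.card ∅ numbers) := by
  obtain ⟨x0, hx0⟩ := List.exists_mem_of_ne_nil numbers hne
  cases hmax : PySem.List.max? (((PySem.List.enumerate numbers 0).foldl
      (fun d p => if d.contains p.2 then d else d.insert p.2 p.1)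
      (PySem.Dict.empty : PySem.Dict Int Int)).values) (fun x => x) with
  | none =>
    exfalso
    have := (PySem.List.max?_eq_none_iff _ _).mp hmax
    have hx : pvFIdx x0 numbers ∈ (([] : List Int)) := by
      rw [← this, alt_values_first]
      exact ⟨x0, hx0, rfl⟩
    simp at hx
  | some m =>
    congr 1
    obtain ⟨k, hk, rfl⟩ := (alt_values_first numbers m).mp (PySem.List.max?_mem hmax)
    have hTne : (∅ : Finset Int) ≠ numbers.toFinset := by
      intro h
      have : x0 ∈ numbers.toFinset := List.mem_toFinset.mpr hx0
      rw [← h] at this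
      simp at this
    obtain ⟨v, hv, _, heq⟩ := pvS_attained numbers.toFinset numbers ∅
      (Finset.empty_subset _) (fun w hw => List.mem_toFinset.mpr hw) (by simp) hTne
    have hle1 : pvFIdx k numbers ≤ pvS numbers.toFinset.card ∅ numbers :=
      pvFIdx_le_pvS numbers.toFinset numbers ∅ (Finset.empty_subset _)
        (fun w hw => List.mem_toFinset.mpr hw) k hk (Finset.notMem_empty k)
    have hle2 : pvFIdx v numbers ≤ pvFIdx k numbers :=
      PySem.List.max?_isMax hmax _ ((alt_values_first numbers _).mpr ⟨v, hv, rfl⟩)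
    omega

theorem alt_min (numbers : List Int) (hne : numbers ≠ []) :
    PySem.List.min? (((PySem.List.enumerate numbers 0).foldl
        (fun (d : PySem.Dict Int Int) (p : Int × Int) => d.insert p.2 p.1)
        (PySem.Dict.empty : PySem.Dict Int Int)).values) (fun x => x)
    = some (pvE numbers) := by
  obtain ⟨x0, hx0⟩ := List.exists_mem_of_ne_nil numbers hne
  cases hmin : PySem.List.min? (((PySem.List.enumerate numbers 0).foldl
      (fun (d : PySem.Dict Int Int) (p : Int × Int) => d.insert p.2 p.1)
      (PySem.Dict.empty : PySem.Dict Int Int)).values) (fun x => x) with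
  | none =>
    exfalso
    have := (PySem.List.min?_eq_none_iff _ _).mp hmin
    have hx : pvLIdx x0 numbers ∈ (([] : List Int)) := by
      rw [← this, alt_values_last]
      exact ⟨x0, hx0, rfl⟩
    simp at hx
  | some m =>
    congr 1
    obtain ⟨k, hk, rfl⟩ := (alt_values_last numbers m).mp (PySem.List.min?_mem hmin)
    obtain ⟨v, hv, heq⟩ := pvE_attained numbers hne
    have hle1 : pvE numbers ≤ pvLIdx k numbers := pvE_le_pvLIdx numbers k hk
    have hle2 : pvLIdx k numbers ≤ pvLIdx v numbers :=
      PySem.List.min?_isMin hmin _ ((alt_values_last numbers _).mpr ⟨v, hv, rfl⟩)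
    omega

theorem count_splits_alt_closed (numbers : List Int) :
    count_splits_alt numbers
      = if numbers = [] then 0
        else max 0 (pvE numbers - pvS numbers.toFinset.card ∅ numbers) := by
  by_cases h : numbers = []
  · subst h
    simp [count_splits_alt]
  · simp only [count_splits_alt, bfold_split, h, if_false]
    rw [alt_max numbers h, alt_min numbers h]

-- ===== VERDICT (by name: the statement is the Claim_ definition above) =====
theorem count_splits_spec : Claim_equal_count_splits := by
  intro numbers _
  unfold Spec_count_splits
  rw [count_splits_closed, count_splits_alt_closed]
  by_cases h : numbers = []
  · subst h; simp [pvE, pvS]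
  · simp [h]
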